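-- pv_equiv track=rewrite | github.com/cr8ivecodesmith/random_scripts | bpi_esoa_ocr.py | is_date
-- ===== SOURCE A (Python) =====
-- MONTHS = 'jan feb mar apr may jun jul aug sep oct nov dec'.split()
--
-- def is_date(text):
--     txt_len, txt_low = len(text), text.lower()
--     return True if any(
--         txt_low.startswith(i)
--         if txt_len > len(i) else
--         i.startswith(txt_low)
--         for i in MONTHS
--     ) else False
-- ===== SOURCE B (Python) =====
-- MONTHS = 'jan feb mar apr may jun jul aug sep oct nov dec'.split()
-- MONTH_SET = set(MONTHS)
-- PREFIXES = {m[:k] for m in MONTHS for k in range(4)}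
--
-- def is_date(text):
--     txt = text.lower()
--     if len(text) > 3:
--         return txt[:3] in MONTH_SET
--     return txt in PREFIXES
-- ===== Notes on version B (the rewrite author's own statement) =====
-- stated objective: simpler
-- what changed: Replaces the per-call 12-iteration scan with a mixed startswith/prefix conditional by one branch on len(text) plus a single membership lookup in prebuilt tables (MONTH_SET and the set of all month-abbreviation prefixes), exploiting that every abbreviation has length 3.
import Mathlib
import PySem

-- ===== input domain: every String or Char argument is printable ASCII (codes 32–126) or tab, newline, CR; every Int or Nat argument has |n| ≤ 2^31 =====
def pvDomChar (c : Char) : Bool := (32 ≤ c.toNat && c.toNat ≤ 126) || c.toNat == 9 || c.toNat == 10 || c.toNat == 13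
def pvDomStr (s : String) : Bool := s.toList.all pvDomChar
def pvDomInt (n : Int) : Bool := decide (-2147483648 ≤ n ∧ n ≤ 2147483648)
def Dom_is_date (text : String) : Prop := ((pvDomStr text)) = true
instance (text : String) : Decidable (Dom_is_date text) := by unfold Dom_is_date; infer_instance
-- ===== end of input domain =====

-- B replaces A's per-call 12-way scan by one length branch plus a lookup in prebuilt prefix tables; return value proven identical on all strings.

-- ===== PORT A =====
def pvMonths : List String :=
  ["jan", "feb", "mar", "apr", "may", "jun", "jul", "aug", "sep", "oct", "nov", "dec"]

def is_date (text : String) : Bool :=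
  let txt_len := PySem.Str.len text
  let txt_low := PySem.Str.lower text
  if pvMonths.any (fun i =>
      if txt_len > PySem.Str.len i then PySem.Str.startswith txt_low i
      else PySem.Str.startswith i txt_low)
  then true else false

-- ===== PORT B =====
def pvMonthSet : PySem.Set String := PySem.Set.ofList pvMonths

def pvPrefixes : PySem.Set String :=
  PySem.Set.ofList (pvMonths.flatMap (fun m =>
    (PySem.List.pyRange 0 4 1).map (fun k => PySem.Str.slice m none (some k))))

def is_date_alt (text : String) : Bool :=
  let txt := PySem.Str.lower text
  if PySem.Str.len text > 3 then
    PySem.Set.contains pvMonthSet (PySem.Str.slice txt none (some 3))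
  else
    PySem.Set.contains pvPrefixes txt

-- ===== PRECONDITION & SPEC =====
def Spec_is_date (text : String) (out : Bool) : Prop := out = is_date_alt text
instance (text : String) (out : Bool) : Decidable (Spec_is_date text out) := by unfold Spec_is_date; infer_instance

-- ===== CLAIM (what is proved, stated in full; the proofs are below) =====
def Claim_equal_is_date : Prop := ∀ (text : String), Dom_is_date text → Spec_is_date text (is_date text)

-- ===== LEMMAS AND PROOFS =====

theorem pv_ite_bool (b : Bool) : (if b = true then true else false) = b := by
  cases b <;> simp

theorem pv_len_lower (s : String) : (PySem.Str.lower s).toList.length = s.toList.length := by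
  rw [PySem.Str.toList_lower]; simp [PySem.Chars.lower]

theorem pv_slice3 (s : String) : (PySem.Str.slice s none (some 3)).toList = s.toList.take 3 := by
  rw [PySem.Str.toList_slice]
  simp only [PySem.Chars.slice_eq_listSlice]
  rw [show ((3:Int)) = ((3:Nat):Int) by norm_num, PySem.List.slice_to_natCast]

theorem pv_sliceK (m : String) (k : Nat) :
    (PySem.Str.slice m none (some (k:Int))).toList = m.toList.take k := by
  rw [PySem.Str.toList_slice]; simp only [PySem.Chars.slice_eq_listSlice]
  rw [PySem.List.slice_to_natCast]

theorem pv_slice_prefix (m : String) (k : Int) (h0 : 0 ≤ k) :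
    (PySem.Str.slice m none (some k)).toList <+: m.toList := by
  rw [PySem.Str.toList_slice]; simp only [PySem.Chars.slice_eq_listSlice]
  rw [PySem.List.slice_to m.toList h0]
  exact List.take_prefix _ _

theorem pv_prefix3 (m l : List Char) (hm : m.length = 3) : (m <+: l) ↔ l.take 3 = m := by
  rw [List.prefix_iff_eq_take, hm, eq_comm]

theorem pv_any_congr {α : Type} (l : List α) (p q : α → Bool) (h : ∀ a ∈ l, p a = q a) :
    l.any p = l.any q := by
  induction l with
  | nil => rfl
  | cons a t ih =>
    simp only [List.any_cons, h a (by simp)]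
    rw [ih (fun x hx => h x (by simp [hx]))]

theorem is_date_main (text : String) : is_date text = is_date_alt text := by
  unfold is_date is_date_alt
  simp only [pv_ite_bool]
  have hmlen : ∀ m ∈ pvMonths, PySem.Str.len m = 3 := by decide
  have hmlen3 : ∀ m ∈ pvMonths, m.toList.length = 3 := by decide
  by_cases h : PySem.Str.len text > 3
  · rw [if_pos h]
    rw [pv_any_congr pvMonths _ (fun i => PySem.Str.startswith (PySem.Str.lower text) i)
      (fun m hm => by rw [hmlen m hm]; exact if_pos h)]
    rw [Bool.eq_iff_iff, List.any_eq_true, PySem.Set.contains_iff]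
    show _ ↔ _ ∈ PySem.Set.ofList pvMonths
    rw [PySem.Set.mem_ofList]
    constructor
    · rintro ⟨m, hm, hs⟩
      rw [PySem.Str.startswith_eq, PySem.Chars.startswith_iff,
        pv_prefix3 _ _ (hmlen3 m hm)] at hs
      have heq : PySem.Str.slice (PySem.Str.lower text) none (some 3) = m := by
        rw [← String.toList_inj, pv_slice3, hs]
      exact heq ▸ hm
    · intro hmem
      refine ⟨_, hmem, ?_⟩
      rw [PySem.Str.startswith_eq, PySem.Chars.startswith_iff,
        pv_prefix3 _ _ (hmlen3 _ hmem), ← pv_slice3]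
  · rw [if_neg h]
    rw [pv_any_congr pvMonths _ (fun i => PySem.Str.startswith i (PySem.Str.lower text))
      (fun m hm => by rw [hmlen m hm]; exact if_neg h)]
    rw [Bool.eq_iff_iff, List.any_eq_true, PySem.Set.contains_iff]
    show _ ↔ _ ∈ PySem.Set.ofList _
    rw [PySem.Set.mem_ofList]
    have hlen : (PySem.Str.lower text).toList.length ≤ 3 := by
      rw [pv_len_lower]
      have h2 := PySem.Str.len_eq text
      have h3 : text.length = text.toList.length := by simp
      omega
    constructor
    · rintro ⟨m, hm, hs⟩
      rw [PySem.Str.startswith_eq, PySem.Chars.startswith_iff, List.prefix_iff_eq_take] at hs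
      rw [List.mem_flatMap]
      refine ⟨m, hm, ?_⟩
      rw [List.mem_map]
      refine ⟨((PySem.Str.lower text).toList.length : Int), ?_, ?_⟩
      · have h03 : (PySem.Str.lower text).toList.length = 0 ∨
            (PySem.Str.lower text).toList.length = 1 ∨
            (PySem.Str.lower text).toList.length = 2 ∨
            (PySem.Str.lower text).toList.length = 3 := by omega
        rcases h03 with h0 | h0 | h0 | h0 <;> rw [h0] <;> decide
      · rw [← String.toList_inj, pv_sliceK]
        exact hs.symm
    · intro hmem
      rw [List.mem_flatMap] at hmem
      obtain ⟨m, hm, hmem⟩ := hmem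
      rw [List.mem_map] at hmem
      obtain ⟨k, hk, hsl⟩ := hmem
      have h0k : (0:Int) ≤ k := by
        have hr : PySem.List.pyRange 0 4 1 = [0, 1, 2, 3] := by decide
        rw [hr] at hk
        simp only [List.mem_cons, List.not_mem_nil, or_false] at hk
        rcases hk with h0 | h0 | h0 | h0 <;> omega
      refine ⟨m, hm, ?_⟩
      rw [PySem.Str.startswith_eq, PySem.Chars.startswith_iff, ← hsl]
      exact pv_slice_prefix m k h0k

-- ===== VERDICT (by name: the statement is the Claim_ definition above) =====
theorem is_date_spec : Claim_equal_is_date := by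
  intro text _
  exact is_date_main text
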